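-- pv_equiv track=rewrite | github.com/2opk/wavetoearth | analysis/compare_iree_baremetal.py | high_intervals
-- ===== SOURCE A (Python) =====
-- from typing import List, Tuple, Optional, Dict, Any
--
-- def normalize_bit(value) -> Optional[int]:
--     if value is None:
--         return None
--     if isinstance(value, bytes):
--         value = value.decode("utf-8", errors="ignore")
--     if not isinstance(value, str):
--         value = str(value)
--     if not value:
--         return None
--     ch = value[0]
--     if ch == "0":
--         return 0
--     if ch == "1":
--         return 1
--     return None
--
-- def get_state_before(changes: List[Tuple[int, str]], start: int) -> Optional[int]:
--     state = None
--     for t, v in changes: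
--         if t >= start:
--             break
--         state = normalize_bit(v)
--     return state
--
-- def high_intervals(changes: List[Tuple[int, str]], start: int, end: int) -> List[Tuple[int, int]]:
--     if end < start:
--         return []
--     state = get_state_before(changes, start)
--     idx = 0
--     while idx < len(changes) and changes[idx][0] < start:
--         idx += 1
--     t = start
--     end_excl = end + 1
--     intervals: List[Tuple[int, int]] = []
--     while t < end_excl:
--         next_t = end_excl
--         if idx < len(changes):
--             next_t = min(next_t, changes[idx][0])
--         if state == 1 and next_t > t:
--             intervals.append((t, next_t))
--         if idx < len(changes) and changes[idx][0] == next_t: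
--             state = normalize_bit(changes[idx][1])
--             idx += 1
--         t = next_t
--     return intervals
-- ===== SOURCE B (Python) =====
-- def _bit(v):
--     return {"0": 0, "1": 1}.get(v[:1])
--
-- def high_intervals(changes, start, end):
--     if end < start:
--         return []
--     # phase 1: state before the window, then the boundary list (time, state)
--     state = None
--     i = 0
--     while i < len(changes) and changes[i][0] < start:
--         state = _bit(changes[i][1])
--         i += 1
--     bounds = [(start, state)]
--     for t, v in changes[i:]:
--         if t > end:
--             break
--         bounds.append((t, _bit(v)))
--     bounds.append((end + 1, None))
--     # phase 2: emit the high segments between consecutive boundaries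
--     return [(a, b) for (a, sa), (b, _) in zip(bounds, bounds[1:]) if sa == 1 and b > a]
-- ===== Notes on version B (the rewrite author's own statement) =====
-- stated objective: alternative
-- what changed: A interleaves event consumption, state updates and interval emission in one stateful while loop over time; B decomposes into two phases: first build an explicit boundary list (start state plus one (time, bit) entry per in-window change and an end+1 sentinel), then emit (a,b) for each consecutive boundary pair whose left state is 1.
import Mathlib
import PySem

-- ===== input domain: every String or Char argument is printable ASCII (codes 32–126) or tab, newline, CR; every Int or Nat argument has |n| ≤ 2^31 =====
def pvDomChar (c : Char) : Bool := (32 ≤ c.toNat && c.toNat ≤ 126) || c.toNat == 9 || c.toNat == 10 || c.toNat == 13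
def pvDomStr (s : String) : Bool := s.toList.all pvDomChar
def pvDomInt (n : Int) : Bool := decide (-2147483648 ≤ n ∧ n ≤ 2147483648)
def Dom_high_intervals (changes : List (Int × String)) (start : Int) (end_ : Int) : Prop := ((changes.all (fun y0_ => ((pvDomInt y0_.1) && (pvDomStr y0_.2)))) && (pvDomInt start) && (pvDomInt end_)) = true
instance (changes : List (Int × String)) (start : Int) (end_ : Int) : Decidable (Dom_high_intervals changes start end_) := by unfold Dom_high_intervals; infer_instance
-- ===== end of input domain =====

-- B replaces A's interleaved event walk by a two-phase decomposition (build a boundary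
-- list, then emit high segments between consecutive boundaries); objective: alternative.

-- ===== PORT A =====
-- normalize_bit (value is a str on this domain; bytes/None branches are dead)
def normBit (v : String) : Option Int :=
  match v.toList with
  | [] => none
  | ch :: _ => if ch = '0' then some 0 else if ch = '1' then some 1 else none

-- get_state_before: scan with break at the first t ≥ start, carrying the state
def gsb (changes : List (Int × String)) (start : Int) (state : Option Int) : Option Int :=
  match changes with
  | [] => state
  | (t, v) :: rest => if t ≥ start then state else gsb rest start (normBit v)

-- the idx-advancing while loop: drop the prefix with time < start
def skipA (changes : List (Int × String)) (start : Int) : List (Int × String) :=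
  match changes with
  | [] => []
  | (t, v) :: rest => if t < start then skipA rest start else (t, v) :: rest

-- the main while loop over (remaining changes, state, t, intervals); the two
-- non-consuming branches set t = end_excl, so the loop exits and they return directly
def loopA (rest : List (Int × String)) (state : Option Int) (t end_excl : Int)
    (acc : List (Int × Int)) : List (Int × Int) :=
  if t < end_excl then
    match rest with
    | [] => if state = some 1 ∧ end_excl > t then acc ++ [(t, end_excl)] else acc
    | (tc, v) :: rest' =>
      let next_t := min end_excl tc
      let acc' := if state = some 1 ∧ next_t > t then acc ++ [(t, next_t)] else acc
      if tc = next_t then loopA rest' (normBit v) next_t end_excl acc'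
      else acc'
  else acc

def high_intervals (changes : List (Int × String)) (start : Int) (end_ : Int) : List (Int × Int) :=
  if end_ < start then []
  else loopA (skipA changes start) (gsb changes start none) start (end_ + 1) []

-- ===== PORT B =====
-- _bit: lookup of the first character (v[:1]) in {"0": 0, "1": 1}
def bitB (v : String) : Option Int :=
  match v.toList with
  | [] => none
  | ch :: _ => if ch = '0' then some 0 else if ch = '1' then some 1 else none

-- phase-1 prefix loop: state before the window together with the remaining changes
def bSkip (changes : List (Int × String)) (start : Int) (state : Option Int) :
    Option Int × List (Int × String) :=
  match changes with
  | [] => (state, [])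
  | (t, v) :: rest => if t < start then bSkip rest start (bitB v) else (state, (t, v) :: rest)

-- phase-1 boundary entries: (t, _bit v) for the remaining changes, breaking at t > end
def bBounds (rest : List (Int × String)) (end_ : Int) : List (Int × Option Int) :=
  match rest with
  | [] => []
  | (t, v) :: rest' => if t > end_ then [] else (t, bitB v) :: bBounds rest' end_

-- phase-2: zip(bounds, bounds[1:]) comprehension
def bPairs (bounds : List (Int × Option Int)) : List (Int × Int) :=
  match bounds with
  | [] => []
  | [_] => []
  | (a, sa) :: (b, sb) :: rest =>
    (if sa = some 1 ∧ b > a then [(a, b)] else []) ++ bPairs ((b, sb) :: rest)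

def high_intervals_alt (changes : List (Int × String)) (start : Int) (end_ : Int) : List (Int × Int) :=
  if end_ < start then []
  else
    let p := bSkip changes start none
    bPairs ((start, p.1) :: (bBounds p.2 end_ ++ [(end_ + 1, none)]))

-- ===== PRECONDITION & SPEC =====
def Spec_high_intervals (changes : List (Int × String)) (start : Int) (end_ : Int) (out : List (Int × Int)) : Prop := out = high_intervals_alt changes start end_
instance (changes : List (Int × String)) (start : Int) (end_ : Int) (out : List (Int × Int)) : Decidable (Spec_high_intervals changes start end_ out) := by unfold Spec_high_intervals; infer_instance

-- ===== CLAIM (what is proved, stated in full; the proofs are below) =====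
def Claim_equal_high_intervals : Prop := ∀ (changes : List (Int × String)) (start : Int) (end_ : Int), Dom_high_intervals changes start end_ → Spec_high_intervals changes start end_ (high_intervals changes start end_)

-- ===== LEMMAS AND PROOFS =====

theorem bSkip_eq_gsb_skipA (changes : List (Int × String)) (start : Int) (state : Option Int) :
    bSkip changes start state = (gsb changes start state, skipA changes start) := by
  induction changes generalizing state with
  | nil => simp [bSkip, gsb, skipA]
  | cons hd tl ih =>
    obtain ⟨t, v⟩ := hd
    by_cases h : t < start
    · simp [bSkip, gsb, skipA, h, not_le.mpr h, ih, bitB, normBit]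
    · simp [bSkip, gsb, skipA, h, not_lt.mp h]

theorem loopA_eq_bPairs (end_ : Int) (rest : List (Int × String)) (state : Option Int)
    (t : Int) (acc : List (Int × Int)) (ht : t < end_ + 1) :
    loopA rest state t (end_ + 1) acc =
      acc ++ bPairs ((t, state) :: (bBounds rest end_ ++ [(end_ + 1, none)])) := by
  induction rest generalizing state t acc with
  | nil => simp [loopA, ht, bBounds, bPairs]; split_ifs <;> simp
  | cons hd tl ih =>
    obtain ⟨tc, v⟩ := hd
    by_cases hle : tc ≤ end_
    · -- consumed with next_t = tc < end_+1
      have hmin : min (end_ + 1) tc = tc := by omega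
      have htc : tc < end_ + 1 := by omega
      simp only [loopA, if_pos ht, hmin]
      rw [if_pos trivial, ih (normBit v) tc _ htc]
      simp [bBounds, not_lt.mpr hle, bPairs, bitB, normBit]
      split_ifs <;> simp
    · by_cases heq : tc = end_ + 1
      · -- consumed with next_t = end_+1; the recursive call exits immediately
        have hmin : min (end_ + 1) tc = end_ + 1 := by omega
        simp only [loopA, if_pos ht, hmin]
        rw [if_pos heq, loopA.eq_def]
        simp [bBounds, not_le.mp hle, bPairs]
        split_ifs <;> simp
      · -- tc > end_+1: next_t = end_+1 ≠ tc, loop exits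
        have hmin : min (end_ + 1) tc = end_ + 1 := by omega
        simp only [loopA, if_pos ht, hmin]
        rw [if_neg heq]
        simp [bBounds, not_le.mp hle, bPairs]
        split_ifs <;> simp

-- ===== VERDICT (by name: the statement is the Claim_ definition above) =====
theorem high_intervals_spec : Claim_equal_high_intervals := by
  intro changes start end_ _
  unfold Spec_high_intervals high_intervals high_intervals_alt
  by_cases h : end_ < start
  · simp [h]
  · have ht : start < end_ + 1 := by omega
    simp only [if_neg h, bSkip_eq_gsb_skipA]
    rw [loopA_eq_bPairs end_ _ _ _ _ ht]
    simp
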